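-- pv_equiv track=rewrite | github.com/Energy-CeRBeR/Tinkoff-algorithms | Занятие 6. Графы-1/ДЗ/C.py | solve
-- ===== SOURCE A (Python) =====
-- def solve(graph, order):
--     in_degree = {node: 0 for node in graph}
--     for node in graph:
--         for neighbor in graph[node]:
--             in_degree[neighbor] += 1
--
--     for node in order:
--         if in_degree[node] != 0:
--             return "NO"
--         for neighbor in graph[node]:
--             in_degree[neighbor] -= 1
--
--     return "YES"
-- ===== SOURCE B (Python) =====
-- def solve(graph, order):
--     preds = {v: [] for v in graph}
--     for u in graph:
--         for v in graph[u]: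
--             preds[v].append(u)
--     for i, u in enumerate(order):
--         if len(preds[u]) != sum(order[:i].count(w) for w in preds[u]):
--             return "NO"
--     return "YES"
-- ===== Notes on version B (the rewrite author's own statement) =====
-- stated objective: alternative
-- what changed: B builds a reverse adjacency (a dict of predecessor lists) once and then judges each order position by a closed-form test - the length of the node's predecessor list must equal the number of occurrences of its predecessors in the order prefix before it - instead of A's Kahn-style in-degree counters decremented in place while walking the order.
import Mathlib
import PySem

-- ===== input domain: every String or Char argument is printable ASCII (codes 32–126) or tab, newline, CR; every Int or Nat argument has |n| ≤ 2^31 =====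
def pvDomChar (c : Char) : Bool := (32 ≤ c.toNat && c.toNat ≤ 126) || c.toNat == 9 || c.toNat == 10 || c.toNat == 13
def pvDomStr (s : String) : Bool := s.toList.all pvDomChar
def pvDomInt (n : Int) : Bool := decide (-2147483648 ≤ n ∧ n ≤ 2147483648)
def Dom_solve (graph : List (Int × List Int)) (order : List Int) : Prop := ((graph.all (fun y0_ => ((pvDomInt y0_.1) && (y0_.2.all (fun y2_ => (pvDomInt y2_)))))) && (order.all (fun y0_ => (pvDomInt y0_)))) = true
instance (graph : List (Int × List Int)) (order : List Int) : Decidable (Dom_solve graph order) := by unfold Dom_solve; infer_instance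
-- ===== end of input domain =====

-- B builds a reverse adjacency (predecessor lists) once and checks each order position
-- with a closed-form prefix-count test, instead of A's dict of in-degree counters
-- decremented while walking the order; objective: alternative.

-- ===== PORT A =====
-- A-side helper: the second Python loop (early `return "NO"`), step for step.
-- `in_degree[x] += 1 / -= 1` and the `in_degree[node]` lookup are ported with
-- Dict.modify/getD, exact under Pre_solve (every key Python actually touches is present).
def solveDecLoop (g : PySem.Dict Int (List Int)) (deg : PySem.Dict Int Int) : List Int → String
  | [] => "YES"
  | node :: rest =>
    if deg.getD node 0 ≠ 0 then "NO"
    else solveDecLoop g ((g.getD node []).foldl (fun d nb => d.modify nb 0 (· - 1)) deg) rest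

def solve (graph : List (Int × List Int)) (order : List Int) : String :=
  let g := PySem.Dict.ofList graph
  let indeg0 := g.keys.foldl (fun d n => d.insert n (0 : Int)) PySem.Dict.empty
  let indeg := g.keys.foldl
    (fun d node => (g.getD node []).foldl (fun d nb => d.modify nb 0 (· + 1)) d) indeg0
  solveDecLoop g indeg order

-- ===== PORT B =====
-- B-side helper: Source B's second loop (early `return "NO"`), step for step over
-- `enumerate(order)`; `preds[u]` and `preds[v].append(u)` are ported with
-- Dict.getD/modify, exact under Pre_solve (every key Python actually touches is present).
def solveAltLoop (preds : PySem.Dict Int (List Int)) (order : List Int) :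
    List (Int × Int) → String
  | [] => "YES"
  | p :: rest =>
    if PySem.List.len (preds.getD p.2 []) ≠
        ((preds.getD p.2 []).map
          (fun w => ((PySem.List.slice order none (some p.1)).count w : Int))).sum
    then "NO"
    else solveAltLoop preds order rest

def solve_alt (graph : List (Int × List Int)) (order : List Int) : String :=
  let g := PySem.Dict.ofList graph
  let preds0 := g.keys.foldl (fun d v => d.insert v ([] : List Int)) PySem.Dict.empty
  let preds := g.keys.foldl
    (fun d u => (g.getD u []).foldl (fun d v => d.modify v [] (· ++ [u])) d) preds0
  solveAltLoop preds order (PySem.List.enumerate order 0)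

-- ===== PRECONDITION & SPEC =====
-- A raises KeyError (and B raises KeyError there too) exactly when some adjacency list
-- contains a non-key node, or when `order` reaches a non-key node before any earlier
-- position already fails the in-degree balance test; Pre_ excludes exactly those raising
-- inputs and admits every input on which A returns.
def Pre_solve (graph : List (Int × List Int)) (order : List Int) : Prop :=
  (∀ u ∈ (PySem.Dict.ofList graph).keys, ∀ v ∈ (PySem.Dict.ofList graph).getD u [],
      v ∈ (PySem.Dict.ofList graph).keys) ∧
  (∀ i < order.length, order[i]! ∉ (PySem.Dict.ofList graph).keys →
    ∃ j < i,
      ((((PySem.Dict.ofList graph).keys.flatMap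
          (fun u => (PySem.Dict.ofList graph).getD u [])).count order[j]! : Int) ≠
        (((order.take j).flatMap
          (fun u => (PySem.Dict.ofList graph).getD u [])).count order[j]! : Int)))
instance (graph : List (Int × List Int)) (order : List Int) : Decidable (Pre_solve graph order) := by
  unfold Pre_solve; infer_instance
def pvWitness_solve : (List (Int × List Int)) × List Int := ([(1, [2]), (2, [])], [1, 2])

def Spec_solve (graph : List (Int × List Int)) (order : List Int) (out : String) : Prop := out = solve_alt graph order
instance (graph : List (Int × List Int)) (order : List Int) (out : String) : Decidable (Spec_solve graph order out) := by unfold Spec_solve; infer_instance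

-- ===== CLAIM (what is proved, stated in full; the proofs are below) =====
def Claim_equal_solve : Prop := ∀ (graph : List (Int × List Int)) (order : List Int), Dom_solve graph order → Pre_solve graph order → Spec_solve graph order (solve graph order)

-- ===== LEMMAS AND PROOFS =====

-- the decrement loop of A subtracts the multiset of neighbours
theorem getD_foldl_modify_sub_one (l : List Int) (d : PySem.Dict Int Int) (v : Int) :
    (l.foldl (fun d x => d.modify x 0 (· - 1)) d).getD v 0 = d.getD v 0 - l.count v := by
  induction l generalizing d with
  | nil => simp
  | cons a l ih =>
    simp only [List.foldl_cons, ih, PySem.Dict.getD_modify, List.count_cons]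
    by_cases h : v = a <;> simp [h] <;> omega

-- the initial all-zeros dict reads 0 everywhere (its default is 0 too)
theorem getD_foldl_insert_zero (l : List Int) (d : PySem.Dict Int Int) (v : Int)
    (h : d.getD v 0 = 0) : (l.foldl (fun d n => d.insert n (0 : Int)) d).getD v 0 = 0 := by
  induction l generalizing d with
  | nil => simpa
  | cons a l ih =>
    rw [List.foldl_cons]
    apply ih
    rw [PySem.Dict.getD_insert]; split <;> simp [h]

-- the nested increment loop of A counts incoming edge occurrences
theorem getD_foldl_inc (adj : Int → List Int) (l : List Int) (d : PySem.Dict Int Int) (v : Int) :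
    (l.foldl (fun d node => (adj node).foldl (fun d nb => d.modify nb 0 (· + 1)) d) d).getD v 0
      = d.getD v 0 + ((l.flatMap adj).count v : Int) := by
  induction l generalizing d with
  | nil => simp
  | cons a l ih =>
    simp only [List.foldl_cons, ih, PySem.Dict.getD_foldl_modify_add_one, List.flatMap_cons,
      List.count_append]
    push_cast; ring

-- characterisation of A's second loop given the counters' value
theorem solveDecLoop_eq_yes_iff (g : PySem.Dict Int (List Int)) (E : List Int) :
    ∀ (rest : List Int) (deg : PySem.Dict Int Int) (c : List Int),
    (∀ v, deg.getD v 0 = (E.count v : Int) - ((c.flatMap (fun u => g.getD u [])).count v : Int)) →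
    (solveDecLoop g deg rest = "YES" ↔
      ∀ p node r, rest = p ++ node :: r →
        (E.count node : Int) = (((c ++ p).flatMap (fun u => g.getD u [])).count node : Int)) := by
  intro rest
  induction rest with
  | nil =>
    intro deg c h
    constructor
    · intro _ p node r hpr
      exact absurd hpr (by simp)
    · intro _; rfl
  | cons a l ih =>
    intro deg c h
    by_cases h0 : deg.getD a 0 = 0
    · have hstep : solveDecLoop g deg (a :: l) =
        solveDecLoop g ((g.getD a []).foldl (fun d nb => d.modify nb 0 (· - 1)) deg) l := by
        rw [solveDecLoop]
        simp [h0]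
      rw [hstep, ih _ (c ++ [a]) (by
        intro v
        rw [getD_foldl_modify_sub_one, h v]
        simp [List.flatMap_append, List.count_append]
        ring)]
      constructor
      · intro hyp p node r hpr
        cases p with
        | nil =>
          simp at hpr
          obtain ⟨h1, h2⟩ := hpr
          subst h1; subst h2
          have := h a
          simp at *
          omega
        | cons b p' =>
          simp at hpr
          obtain ⟨h1, h2⟩ := hpr
          subst h1
          have := hyp p' node r h2
          simpa [List.append_assoc] using this
      · intro hyp p node r hpr
        have := hyp (a :: p) node r (by simp [hpr])
        simpa [List.append_assoc] using this
    · have hstep : solveDecLoop g deg (a :: l) = "NO" := by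
        rw [solveDecLoop]; simp [h0]
      rw [hstep]
      constructor
      · intro h'; exact absurd h' (by simp)
      · intro hyp
        have := hyp [] a l (by simp)
        have hv := h a
        simp at this hv
        omega

theorem solveDecLoop_yes_or_no (g : PySem.Dict Int (List Int)) :
    ∀ rest deg, solveDecLoop g deg rest = "YES" ∨ solveDecLoop g deg rest = "NO" := by
  intro rest; induction rest with
  | nil => intro deg; left; rfl
  | cons a l ih =>
    intro deg; rw [solveDecLoop]; split
    · right; rfl
    · exact ih _

-- B's loop is a pure all-positions check
theorem solveAltLoop_eq_yes_iff (preds : PySem.Dict Int (List Int)) (order : List Int) :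
    ∀ ps, solveAltLoop preds order ps = "YES" ↔
      ∀ p ∈ ps, PySem.List.len (preds.getD p.2 []) =
        ((preds.getD p.2 []).map
          (fun w => ((PySem.List.slice order none (some p.1)).count w : Int))).sum := by
  intro ps
  induction ps with
  | nil => simp [solveAltLoop]
  | cons p ps ih =>
    rw [solveAltLoop]
    by_cases hp : PySem.List.len (preds.getD p.2 []) =
        ((preds.getD p.2 []).map
          (fun w => ((PySem.List.slice order none (some p.1)).count w : Int))).sum
    · rw [if_neg (by simpa using hp), ih]
      constructor
      · intro h q hq
        rcases List.mem_cons.1 hq with h' | h'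
        · subst h'; exact hp
        · exact h q h'
      · intro h q hq; exact h q (List.mem_cons_of_mem _ hq)
    · rw [if_pos (by simpa using hp)]
      constructor
      · intro h; exact absurd h (by simp)
      · intro h; exact absurd (h p List.mem_cons_self) hp

theorem solveAltLoop_yes_or_no (preds : PySem.Dict Int (List Int)) (order : List Int) :
    ∀ ps, solveAltLoop preds order ps = "YES" ∨ solveAltLoop preds order ps = "NO" := by
  intro ps; induction ps with
  | nil => left; rfl
  | cons p ps ih =>
    rw [solveAltLoop]; split
    · right; rfl
    · exact ih

-- the initial all-[] dict reads [] everywhere (its default is [] too)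
theorem getD_foldl_insert_nil (l : List Int) (d : PySem.Dict Int (List Int)) (v : Int)
    (h : d.getD v [] = []) : (l.foldl (fun d n => d.insert n ([] : List Int)) d).getD v [] = [] := by
  induction l generalizing d with
  | nil => simpa
  | cons a l ih =>
    rw [List.foldl_cons]
    apply ih
    rw [PySem.Dict.getD_insert]; split <;> simp [h]

-- appending u once per occurrence of v in ws
theorem getD_foldl_modify_append_rep (ws : List Int) (u : Int) (d : PySem.Dict Int (List Int))
    (v : Int) :
    (ws.foldl (fun d w => d.modify w [] (· ++ [u])) d).getD v []
      = d.getD v [] ++ List.replicate (ws.count v) u := by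
  induction ws generalizing d with
  | nil => simp
  | cons a ws ih =>
    simp only [List.foldl_cons, ih, PySem.Dict.getD_modify, List.count_cons]
    by_cases h : v = a
    · simp only [h, beq_self_eq_true, if_true, List.append_assoc]
      have hrep : [u] ++ List.replicate (ws.count a) u
          = List.replicate (ws.count a) u ++ [u] := by
        rw [List.singleton_append, ← List.replicate_succ, List.replicate_succ']
      rw [hrep, List.replicate_succ']
    · have h2 : (a == v) = false := by simpa using fun e => h e.symm
      simp [h, h2]

-- the nested build loop of B collects, per node v, one copy of u per edge occurrence u→v
theorem preds_getD (adj : Int → List Int) (l : List Int) (d : PySem.Dict Int (List Int))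
    (v : Int) :
    (l.foldl (fun d u => (adj u).foldl (fun d w => d.modify w [] (· ++ [u])) d) d).getD v []
      = d.getD v [] ++ l.flatMap (fun u => List.replicate ((adj u).count v) u) := by
  induction l generalizing d with
  | nil => simp
  | cons a l ih =>
    simp only [List.foldl_cons, ih, getD_foldl_modify_append_rep, List.flatMap_cons,
      List.append_assoc]

-- counting inside the collected predecessor multiset
theorem count_flatMap_replicate (K : List Int) (c : Int → Nat) (w : Int) (hK : K.Nodup) :
    (K.flatMap (fun u => List.replicate (c u) u)).count w = if w ∈ K then c w else 0 := by
  induction K with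
  | nil => simp
  | cons a K ih =>
    have hK' := hK.of_cons
    simp only [List.flatMap_cons, List.count_append, List.count_replicate, ih hK']
    by_cases h : a = w
    · subst h
      have hnot : a ∉ K := (List.nodup_cons.1 hK).1
      simp [hnot]
    · have h2 : (a == w) = false := by simpa using h
      rw [h2]
      simp only [Bool.false_eq_true, if_false, Nat.zero_add, List.mem_cons]
      by_cases hw : w ∈ K
      · simp [hw]
      · simp [hw]
        exact fun e => absurd e.symm h

-- a 0/1 indicator sum is a count
theorem sum_indicator (A : List Int) (b : Int) :
    (A.map (fun x => if (b == x) = true then 1 else 0)).sum = A.count b := by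
  induction A with
  | nil => simp
  | cons a A ih =>
    simp only [List.map_cons, List.sum_cons, List.count_cons, ih]
    by_cases h : b = a
    · simp [h]; omega
    · have h2 : (b == a) = false := by simpa using h
      simp [h2]
      exact fun e => h e.symm

-- the double-counting identity: Σ_{x∈A} count_B(x) = Σ_{b∈B} count_A(b)
theorem sum_map_count_comm (A B : List Int) :
    (A.map (fun x => B.count x)).sum = (B.map (fun x => A.count x)).sum := by
  induction B with
  | nil => simp
  | cons b B ih =>
    have hstep : (A.map (fun x => (b :: B).count x)).sum
        = (A.map (fun x => B.count x)).sum + A.count b := by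
      simp only [List.count_cons]
      rw [List.sum_map_add, sum_indicator]
    rw [hstep, ih, List.map_cons, List.sum_cons]
    omega

-- casting a sum of Nat counts to Int
theorem sum_map_cast (l : List Int) (f : Int → Nat) :
    (l.map (fun w => (f w : Int))).sum = ((l.map f).sum : Int) := by
  induction l with
  | nil => simp
  | cons a l ih => simp [ih]

-- ===== VERDICT (by name: the statement is the Claim_ definition above) =====
theorem solve_spec : Claim_equal_solve := by
  intro graph order _ _
  unfold Spec_solve
  set g := PySem.Dict.ofList graph with hg
  set K := g.keys with hKdef
  have hK : K.Nodup := PySem.Dict.nodup_keys_ofList graph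
  set adj : Int → List Int := fun u => g.getD u [] with hadj
  set E := K.flatMap adj with hE
  set indeg := K.foldl (fun d node => (adj node).foldl (fun d nb => d.modify nb 0 (· + 1)) d)
    (K.foldl (fun d n => d.insert n (0 : Int)) PySem.Dict.empty) with hindegdef
  set preds := K.foldl (fun d u => (adj u).foldl (fun d v => d.modify v [] (· ++ [u])) d)
    (K.foldl (fun d v => d.insert v ([] : List Int)) PySem.Dict.empty) with hpredsdef
  have hsolveA : solve graph order = solveDecLoop g indeg order := rfl
  have hsolveB : solve_alt graph order = solveAltLoop preds order (PySem.List.enumerate order 0) :=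
    rfl
  -- A = "YES" ↔ P
  have hA : solve graph order = "YES" ↔
      (∀ p node r, order = p ++ node :: r →
        (E.count node : Int) = ((p.flatMap adj).count node : Int)) := by
    have hindeg : ∀ v, indeg.getD v 0 = (E.count v : Int) := by
      intro v
      rw [hindegdef, getD_foldl_inc, getD_foldl_insert_zero _ _ _ (PySem.Dict.getD_empty v 0),
        ← hE]
      ring
    have := solveDecLoop_eq_yes_iff g E order indeg []
      (by intro v; rw [hindeg v]; simp)
    rw [hsolveA, this]
    simp [← hadj]
  -- the predecessor lists of B
  have hpreds : ∀ v, preds.getD v []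
      = K.flatMap (fun u => List.replicate ((adj u).count v) u) := by
    intro v
    rw [hpredsdef, preds_getD, getD_foldl_insert_nil _ _ _ (PySem.Dict.getD_empty v [])]
    simp
  have hdefault : ∀ w, w ∉ K → adj w = [] := by
    intro w hw
    show g.getD w [] = []
    apply PySem.Dict.getD_of_not_contains
    rw [PySem.Dict.contains_eq_decide_mem_keys]
    simpa [← hKdef] using hw
  have hcount_pred : ∀ v w,
      (K.flatMap (fun u => List.replicate ((adj u).count v) u)).count w = (adj w).count v := by
    intro v w
    rw [count_flatMap_replicate K _ w hK]
    by_cases hw : w ∈ K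
    · simp [hw]
    · simp [hw, hdefault w hw]
  -- the per-position boolean test of B, read back through counts
  have hcond : ∀ (pr : Int × Int),
      (PySem.List.len (preds.getD pr.2 []) =
        ((preds.getD pr.2 []).map
          (fun w => ((PySem.List.slice order none (some pr.1)).count w : Int))).sum)
      ↔ ((E.count pr.2 : Int)
          = (((PySem.List.slice order none (some pr.1)).flatMap adj).count pr.2 : Int)) := by
    intro pr
    have hlen : PySem.List.len (preds.getD pr.2 []) = (E.count pr.2 : Int) := by
      rw [PySem.List.len_eq, hpreds]
      norm_cast
      rw [hE, List.count_flatMap]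
      simp [List.length_flatMap, Function.comp_def]
    have hsum : ((preds.getD pr.2 []).map
          (fun w => ((PySem.List.slice order none (some pr.1)).count w : Int))).sum
        = (((PySem.List.slice order none (some pr.1)).flatMap adj).count pr.2 : Int) := by
      rw [sum_map_cast, sum_map_count_comm, hpreds]
      have : ((PySem.List.slice order none (some pr.1)).map
            (fun w => (K.flatMap (fun u => List.replicate ((adj u).count pr.2) u)).count w))
          = ((PySem.List.slice order none (some pr.1)).map (fun w => (adj w).count pr.2)) :=
        List.map_congr_left (fun w _ => hcount_pred pr.2 w)
      rw [this, List.count_flatMap]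
      simp [Function.comp_def]
    rw [hlen, hsum]
  -- B = "YES" ↔ the per-position test
  have hB : solve_alt graph order = "YES" ↔
      (∀ pr ∈ PySem.List.enumerate order 0,
        (E.count pr.2 : Int)
          = (((PySem.List.slice order none (some pr.1)).flatMap adj).count pr.2 : Int)) := by
    rw [hsolveB, solveAltLoop_eq_yes_iff]
    constructor
    · intro h pr hpr; exact (hcond pr).1 (h pr hpr)
    · intro h pr hpr; exact (hcond pr).2 (h pr hpr)
  -- P ↔ the per-position test
  have hPQ : (∀ p node r, order = p ++ node :: r →
        (E.count node : Int) = ((p.flatMap adj).count node : Int)) ↔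
      (∀ pr ∈ PySem.List.enumerate order 0,
        (E.count pr.2 : Int)
          = (((PySem.List.slice order none (some pr.1)).flatMap adj).count pr.2 : Int)) := by
    constructor
    · intro hP pr hpr
      obtain ⟨k, hk, hpr⟩ := (PySem.List.mem_enumerate_iff order 0 pr).1 hpr
      subst hpr
      have hsplit : order = order.take k ++ order[k] :: order.drop (k + 1) := by
        conv_lhs => rw [← List.take_append_drop k order]
        rw [List.getElem_cons_drop]
      have := hP _ _ _ hsplit
      simpa [PySem.List.slice_to_natCast] using this
    · intro hall p node r hsplit
      have hk : p.length < order.length := by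
        rw [hsplit]; simp
      have hmem : ((0 : Int) + (p.length : Int), order[p.length]) ∈ PySem.List.enumerate order 0 :=
        (PySem.List.mem_enumerate_iff order 0 _).2 ⟨p.length, hk, rfl⟩
      have hnode : order[p.length] = node := by
        subst hsplit
        rw [List.getElem_append_right (Nat.le_refl p.length)]
        simp
      have := hall _ hmem
      rw [hnode] at this
      have htake : PySem.List.slice order none (some ((0 : Int) + (p.length : Int))) = p := by
        rw [zero_add, PySem.List.slice_to_natCast, hsplit, List.take_left]
      rw [htake] at this
      exact this
  -- combine
  by_cases hAY : solve graph order = "YES"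
  · rw [hAY, (hB.2 (hPQ.1 (hA.1 hAY))).symm]
  · have hAN : solve graph order = "NO" := by
      rcases solveDecLoop_yes_or_no g order indeg with h | h
      · exact absurd (hsolveA ▸ h) hAY
      · exact hsolveA ▸ h
    have hBN : solve_alt graph order = "NO" := by
      by_cases hBY : solve_alt graph order = "YES"
      · exact absurd (hA.2 (hPQ.2 (hB.1 hBY))) hAY
      · rcases solveAltLoop_yes_or_no preds order (PySem.List.enumerate order 0) with h | h
        · exact absurd (hsolveB ▸ h) hBY
        · exact hsolveB ▸ h
    rw [hAN, hBN]
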